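-- pv_equiv track=rewrite | github.com/TetyanaLi/hillel_python | LESSON_1/LESSON_11/lesson 11-2.py | hide_email
-- ===== SOURCE A (Python) =====
-- def hide_email (some_list):
--     elements = some_list.split('@')
--     print
--     new_list = []
--     for i in elements:
--         new_list.append(len(i))
--         d = dict(zip(new_list, elements))
--         lw = d.get(max(new_list))
--     return lw
-- ===== SOURCE B (Python) =====
-- def hide_email(some_list):
--     # One pass over the split parts, keeping the running best;
--     # '>=' keeps the LAST part of maximal length, matching A.
--     best = ''
--     for part in some_list.split('@'):
--         if len(part) >= len(best):
--             best = part
--     return best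
-- ===== Notes on version B (the rewrite author's own statement) =====
-- stated objective: simpler
-- what changed: A rebuilds a length-keyed dict of zip(lengths, parts) and recomputes max on every iteration; B is a single pass keeping a running best part (>= so ties go to the last occurrence), with no dict, zip or max.
import Mathlib
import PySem

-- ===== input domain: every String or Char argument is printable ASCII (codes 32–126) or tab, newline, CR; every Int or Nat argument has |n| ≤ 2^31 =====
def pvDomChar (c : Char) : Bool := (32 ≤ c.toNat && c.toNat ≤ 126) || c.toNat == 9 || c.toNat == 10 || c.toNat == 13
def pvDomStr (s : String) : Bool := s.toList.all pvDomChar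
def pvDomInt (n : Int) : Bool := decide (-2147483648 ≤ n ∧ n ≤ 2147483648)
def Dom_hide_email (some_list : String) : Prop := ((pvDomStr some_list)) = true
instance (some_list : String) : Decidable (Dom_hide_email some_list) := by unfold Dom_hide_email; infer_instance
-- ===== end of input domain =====

-- B replaces A's per-iteration dict/zip/max rebuild with one running-best pass; objective: simpler.

-- ===== PORT A =====
-- loop body of A: append len(i), rebuild d = dict(zip(new_list, elements)), lw = d.get(max(new_list))
def pvStepA (es : List String) (st : List Int × Option String) (i : String) :
    List Int × Option String :=
  let new_list := st.1 ++ [PySem.Str.len i]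
  let d := PySem.Dict.ofList (new_list.zip es)
  -- max(new_list) raises only on an empty list, which never occurs inside the loop
  let lw := (PySem.List.max? new_list (fun y => y)).bind (fun m => d.get? m)
  (new_list, lw)

def hide_email (some_list : String) : String :=
  let elements := (PySem.Str.split? some_list "@").getD []  -- sep ≠ "" so split? is `some`
  -- `print` is a no-op; lw starts unbound (none); split never yields [], so the
  -- loop always runs and the final lw is `some`; `.getD ""` only discharges the Option
  let st := elements.foldl (pvStepA elements) ([], none)
  st.2.getD ""

-- ===== PORT B =====
def hide_email_alt (some_list : String) : String :=
  ((PySem.Str.split? some_list "@").getD []).foldl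
    (fun best part => if PySem.Str.len best ≤ PySem.Str.len part then part else best) ""

-- ===== PRECONDITION & SPEC =====
def Spec_hide_email (some_list : String) (out : String) : Prop := out = hide_email_alt some_list
instance (some_list : String) (out : String) : Decidable (Spec_hide_email some_list out) := by unfold Spec_hide_email; infer_instance

-- ===== CLAIM (what is proved, stated in full; the proofs are below) =====
def Claim_equal_hide_email : Prop := ∀ (some_list : String), Dom_hide_email some_list → Spec_hide_email some_list (hide_email some_list)

-- ===== LEMMAS AND PROOFS =====

-- B's loop body and its fold, as proof-side abbreviations
def pvBestStep (b p : String) : String :=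
  if PySem.Str.len b ≤ PySem.Str.len p then p else b

def pvBestOf (ps : List String) : String := ps.foldl pvBestStep ""

theorem pvLen_nonneg (s : String) : 0 ≤ PySem.Str.len s := by
  simp [PySem.Str.len]

theorem pvLen_bestStep (b p : String) :
    PySem.Str.len (pvBestStep b p) = max (PySem.Str.len b) (PySem.Str.len p) := by
  unfold pvBestStep; split_ifs with h <;> omega

theorem pvFoldl_max_len (t : List String) (b : String) :
    (t.map PySem.Str.len).foldl max (PySem.Str.len b) =
      PySem.Str.len (t.foldl pvBestStep b) := by
  induction t generalizing b with
  | nil => rfl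
  | cons i t ih =>
      simp only [List.map_cons, List.foldl_cons]
      rw [← pvLen_bestStep, ih]

theorem pvBestStep_empty (h : String) : pvBestStep "" h = h := by
  unfold pvBestStep
  rw [if_pos]
  exact le_trans (by decide) (pvLen_nonneg h)

theorem pvBestOf_cons (h : String) (t : List String) :
    pvBestOf (h :: t) = t.foldl pvBestStep h := by
  unfold pvBestOf
  rw [List.foldl_cons, pvBestStep_empty]

theorem pvMax?_len (ps : List String) (hps : ps ≠ []) :
    PySem.List.max? (ps.map PySem.Str.len) (fun y => y) =
      some (PySem.Str.len (pvBestOf ps)) := by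
  cases ps with
  | nil => exact absurd rfl hps
  | cons h t =>
      rw [List.map_cons, PySem.List.max?_id_cons, pvBestOf_cons, pvFoldl_max_len]

theorem pvBestOf_append (ps : List String) (x : String) :
    pvBestOf (ps ++ [x]) = pvBestStep (pvBestOf ps) x := by
  unfold pvBestOf; simp [List.foldl_append]

theorem pvDict_ofList_append (l : List (Int × String)) (p : Int × String) :
    PySem.Dict.ofList (l ++ [p]) = (PySem.Dict.ofList l).insert p.1 p.2 := by
  simp [PySem.Dict.ofList, PySem.Dict.update, List.foldl_append]

-- dict(zip(lengths, parts)) looked up at the max length yields the last longest part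
theorem pvDict_lookup (ps : List String) (hps : ps ≠ []) :
    (PySem.Dict.ofList ((ps.map PySem.Str.len).zip ps)).get?
        (PySem.Str.len (pvBestOf ps)) = some (pvBestOf ps) := by
  induction ps using List.reverseRecOn with
  | nil => exact absurd rfl hps
  | append_singleton ps x ih =>
      have hz : ((ps ++ [x]).map PySem.Str.len).zip (ps ++ [x]) =
          (ps.map PySem.Str.len).zip ps ++ [(PySem.Str.len x, x)] := by
        rw [List.map_append, List.zip_append (by simp)]
        rfl
      rw [hz, pvDict_ofList_append, pvBestOf_append]
      cases hp : ps with
      | nil =>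
          simp only [pvBestOf, List.foldl_nil]
          rw [pvBestStep_empty]
          exact PySem.Dict.get?_insert_self _ _ _
      | cons h t =>
          rw [← hp]
          have hne : ps ≠ [] := by rw [hp]; simp
          unfold pvBestStep
          split_ifs with hle
          · exact PySem.Dict.get?_insert_self _ _ _
          · rw [PySem.Dict.get?_insert_of_ne _ _ (by omega)]
            exact ih hne

-- loop invariant for A's fold
theorem pvFoldA (suf pre : List String) (lw0 : Option String) (hsuf : suf ≠ []) :
    suf.foldl (pvStepA (pre ++ suf)) (pre.map PySem.Str.len, lw0) =
      ((pre ++ suf).map PySem.Str.len, some (pvBestOf (pre ++ suf))) := by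
  induction suf generalizing pre lw0 with
  | nil => exact absurd rfl hsuf
  | cons i suf ih =>
      have hassoc : pre ++ i :: suf = (pre ++ [i]) ++ suf := by simp
      have hmap : pre.map PySem.Str.len ++ [PySem.Str.len i] =
          (pre ++ [i]).map PySem.Str.len := by simp
      have hz : ((pre ++ [i]).map PySem.Str.len).zip ((pre ++ [i]) ++ suf) =
          ((pre ++ [i]).map PySem.Str.len).zip (pre ++ [i]) := by
        conv_lhs => rw [← List.append_nil ((pre ++ [i]).map PySem.Str.len)]
        rw [List.zip_append (by simp)]
        simp
      have hstep : pvStepA (pre ++ i :: suf) (pre.map PySem.Str.len, lw0) i =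
          ((pre ++ [i]).map PySem.Str.len, some (pvBestOf (pre ++ [i]))) := by
        unfold pvStepA
        simp only [hmap, hassoc, hz]
        rw [pvMax?_len (pre ++ [i]) (by simp), Option.bind_some,
          pvDict_lookup (pre ++ [i]) (by simp)]
      rw [List.foldl_cons, hstep]
      cases hs : suf with
      | nil => simp
      | cons a b =>
          rw [← hs, hassoc, ih (pre ++ [i]) _ (by rw [hs]; simp)]

-- ===== VERDICT (by name: the statement is the Claim_ definition above) =====
theorem hide_email_spec : Claim_equal_hide_email := by
  intro s _
  unfold Spec_hide_email hide_email hide_email_alt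
  cases hes : (PySem.Str.split? s "@").getD [] with
  | nil => rfl
  | cons h t =>
      have hf := pvFoldA (h :: t) [] none (by simp)
      simp only [List.nil_append, List.map_nil] at hf
      show (List.foldl (pvStepA (h :: t)) ([], none) (h :: t)).2.getD "" = _
      rw [hf]
      rfl
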